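-- pv_equiv track=rewrite | github.com/davidbstein/textchart | src/textchart/textchart.py | _render_key
-- ===== SOURCE A (Python) =====
-- def _render_key(counts, glyph_lookup, glyph_thresholds):
--   glyph_dict = {glyph: [] for glyph in glyph_lookup[1:-1]}
--   for row in counts:
--     cur_row = ""
--     for count in row:
--       glyph = glyph_lookup[sum(count >= threshold for threshold in glyph_thresholds)]
--       if glyph in glyph_dict:
--         glyph_dict[glyph].append(count)
--   glyph_vals = sorted((min(g_counts), max(g_counts), glyph) for glyph, g_counts in glyph_dict.items() if g_counts)
--   to_ret = []
--   cur=None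
--   for min_, max_, glyph in glyph_vals:
--     if cur==min_:
--       continue
--     cur = min_
--     if min_ != max_:
--       to_ret.append(f'"{glyph}": {min_} - {max_} points')
--     else:
--       to_ret.append(f'"{glyph}": {max_} point{"" if max_==1 else "s"}')
--   return to_ret
-- ===== SOURCE B (Python) =====
-- def _render_key(counts, glyph_lookup, glyph_thresholds):
--     inner = glyph_lookup[1:-1]
--     flat = [c for row in counts for c in row]
--     pairs = [(glyph_lookup[sum(c >= t for t in glyph_thresholds)], c) for c in flat]
--     entries = []
--     for g in dict.fromkeys(inner):
--         vals = [c for gg, c in pairs if gg == g]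
--         if vals:
--             entries.append((min(vals), max(vals), g))
--     entries.sort()
--
--     def fmt(mn, mx, g):
--         if mn != mx:
--             return f'"{g}": {mn} - {mx} points'
--         return f'"{g}": {mx} point' + ('' if mx == 1 else 's')
--
--     head = [fmt(*entries[0])] if entries else []
--     return head + [fmt(mn, mx, g)
--                    for (pmn, _, _), (mn, mx, g) in zip(entries, entries[1:])
--                    if pmn != mn]
-- ===== Notes on version B (the rewrite author's own statement) =====
-- stated objective: alternative
-- what changed: B replaces A's single streaming pass that appends every count into a dict of per-glyph lists (then takes min/max of each list) by flattening the grid, classifying each count once into (glyph, count) pairs, and doing one filter scan per distinct inner glyph; A's cur-accumulator dedup loop becomes a zip-with-successor comprehension over consecutive entries.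
import Mathlib
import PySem

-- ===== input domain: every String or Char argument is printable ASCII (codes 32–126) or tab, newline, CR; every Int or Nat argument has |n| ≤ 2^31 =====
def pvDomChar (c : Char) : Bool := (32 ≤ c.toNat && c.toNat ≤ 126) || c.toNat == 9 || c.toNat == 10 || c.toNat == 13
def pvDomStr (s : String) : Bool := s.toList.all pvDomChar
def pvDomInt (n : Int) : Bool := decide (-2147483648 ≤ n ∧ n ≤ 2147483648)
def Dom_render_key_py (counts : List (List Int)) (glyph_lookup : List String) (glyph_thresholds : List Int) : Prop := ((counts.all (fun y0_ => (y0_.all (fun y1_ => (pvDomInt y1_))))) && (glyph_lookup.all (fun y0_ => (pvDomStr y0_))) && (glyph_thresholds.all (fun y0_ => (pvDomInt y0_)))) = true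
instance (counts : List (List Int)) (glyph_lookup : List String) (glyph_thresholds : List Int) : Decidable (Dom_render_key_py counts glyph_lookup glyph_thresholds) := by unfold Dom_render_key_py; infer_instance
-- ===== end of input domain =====

-- B flattens the grid, classifies each count once into (glyph, count) pairs, then does one
-- filter scan per distinct inner glyph instead of A's dict of appended per-glyph count lists,
-- and dedups equal minima via zip-with-successor instead of A's cur accumulator:
-- an alternative decomposition of the same legend computation (no speed claim).


-- ===== PORT A =====
-- glyph_lookup[sum(count >= threshold for threshold in glyph_thresholds)] — the literal
-- classifying subexpression both Python sources contain, shared by the two ports.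
-- Total form: an out-of-range index (IndexError in Python, excluded by Pre_) yields "".
def pvGlyphAt (glyph_lookup : List String) (glyph_thresholds : List Int) (count : Int) : String :=
  (PySem.List.pyGet? glyph_lookup
    (glyph_thresholds.foldl (fun acc threshold => acc + (if count ≥ threshold then 1 else 0)) (0 : Int))).getD ""

-- Python sorts the (min, max, glyph) 3-tuples lexicographically; both ports use sorted2 on the
-- (min, max) components, exact here because each count value classifies to exactly one glyph,
-- so the entries' first components are pairwise distinct wherever the programs return.
def render_key_py (counts : List (List Int)) (glyph_lookup : List String) (glyph_thresholds : List Int) : List String :=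
  let glyph_dict : PySem.Dict String (List Int) :=
    (PySem.List.slice glyph_lookup (some 1) (some (-1))).foldl
      (fun d glyph => d.insert glyph []) PySem.Dict.empty
  let glyph_dict := counts.foldl (fun d row =>
      row.foldl (fun d count =>
        let glyph := pvGlyphAt glyph_lookup glyph_thresholds count
        if d.contains glyph then d.modify glyph [] (fun l => l ++ [count]) else d) d) glyph_dict
  let glyph_vals := PySem.List.sorted2
    (glyph_dict.items.filterMap (fun p =>
      if p.2 ≠ ([] : List Int) then
        some (((PySem.List.min? p.2 (fun x => x)).getD 0 : Int),
              ((PySem.List.max? p.2 (fun x => x)).getD 0 : Int), p.1)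
      else none))
    (fun e => e.1) (fun e => e.2.1)
  (glyph_vals.foldl (fun (st : List String × Option Int) e =>
      if st.2 == some e.1 then st
      else (st.1 ++ [if e.1 ≠ e.2.1 then
              "\"" ++ e.2.2 ++ "\": " ++ PySem.Int.toStr e.1 ++ " - " ++ PySem.Int.toStr e.2.1 ++ " points"
            else
              "\"" ++ e.2.2 ++ "\": " ++ PySem.Int.toStr e.2.1 ++ " point" ++ (if e.2.1 == 1 then "" else "s")],
            some e.1)) (([] : List String), (none : Option Int))).1

-- ===== PORT B =====
def pvFmt (mn mx : Int) (g : String) : String :=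
  if mn ≠ mx then
    "\"" ++ g ++ "\": " ++ PySem.Int.toStr mn ++ " - " ++ PySem.Int.toStr mx ++ " points"
  else
    "\"" ++ g ++ "\": " ++ PySem.Int.toStr mx ++ " point" ++ (if mx == 1 then "" else "s")

def render_key_py_alt (counts : List (List Int)) (glyph_lookup : List String) (glyph_thresholds : List Int) : List String :=
  let inner := PySem.List.slice glyph_lookup (some 1) (some (-1))
  let flat := counts.foldl (fun acc row => acc ++ row) ([] : List Int)
  let pairs := flat.map (fun c => (pvGlyphAt glyph_lookup glyph_thresholds c, c))
  let entries := (PySem.List.dedup inner).filterMap (fun g =>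
      let vals := pairs.filterMap (fun p => if p.1 == g then some p.2 else none)
      if vals ≠ ([] : List Int) then
        some (((PySem.List.min? vals (fun x => x)).getD 0 : Int),
              ((PySem.List.max? vals (fun x => x)).getD 0 : Int), g)
      else none)
  let entries := PySem.List.sorted2 entries (fun e => e.1) (fun e => e.2.1)
  let head := match entries with
    | [] => ([] : List String)
    | e :: _ => [pvFmt e.1 e.2.1 e.2.2]
  head ++ (entries.zip (PySem.List.slice entries (some 1) none)).filterMap (fun pe =>
      if pe.1.1 ≠ pe.2.1 then some (pvFmt pe.2.1 pe.2.2.1 pe.2.2.2) else none)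

-- ===== PRECONDITION & SPEC =====
-- Exactly where Python A returns normally: every count's threshold index is inside glyph_lookup
-- (otherwise glyph_lookup[...] raises IndexError).
def Pre_render_key_py (counts : List (List Int)) (glyph_lookup : List String) (glyph_thresholds : List Int) : Prop :=
  ∀ row ∈ counts, ∀ c ∈ row, glyph_thresholds.countP (fun t => decide (t ≤ c)) < glyph_lookup.length
instance (counts : List (List Int)) (glyph_lookup : List String) (glyph_thresholds : List Int) : Decidable (Pre_render_key_py counts glyph_lookup glyph_thresholds) := by unfold Pre_render_key_py; infer_instance

def pvWitness_render_key_py : List (List Int) × List String × List Int :=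
  ([[0], [5]], ["lo", "a", "b", "hi"], [1, 3, 10])

def Spec_render_key_py (counts : List (List Int)) (glyph_lookup : List String) (glyph_thresholds : List Int) (out : List String) : Prop := out = render_key_py_alt counts glyph_lookup glyph_thresholds
instance (counts : List (List Int)) (glyph_lookup : List String) (glyph_thresholds : List Int) (out : List String) : Decidable (Spec_render_key_py counts glyph_lookup glyph_thresholds out) := by unfold Spec_render_key_py; infer_instance

-- ===== CLAIM (what is proved, stated in full; the proofs are below) =====
def Claim_equal_render_key_py : Prop := ∀ (counts : List (List Int)) (glyph_lookup : List String) (glyph_thresholds : List Int), Dom_render_key_py counts glyph_lookup glyph_thresholds → Pre_render_key_py counts glyph_lookup glyph_thresholds → Spec_render_key_py counts glyph_lookup glyph_thresholds (render_key_py counts glyph_lookup glyph_thresholds)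

-- ===== LEMMAS AND PROOFS =====

-- helper names for the proofs
def pvStep (G : Int → String) (d : PySem.Dict String (List Int)) (c : Int) : PySem.Dict String (List Int) :=
  if d.contains (G c) then d.modify (G c) [] (fun l => l ++ [c]) else d

def pvAStep (st : List String × Option Int) (e : Int × Int × String) : List String × Option Int :=
  if st.2 == some e.1 then st
  else (st.1 ++ [if e.1 ≠ e.2.1 then
          "\"" ++ e.2.2 ++ "\": " ++ PySem.Int.toStr e.1 ++ " - " ++ PySem.Int.toStr e.2.1 ++ " points"
        else
          "\"" ++ e.2.2 ++ "\": " ++ PySem.Int.toStr e.2.1 ++ " point" ++ (if e.2.1 == 1 then "" else "s")],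
        some e.1)

def pvEmit : Option Int → List (Int × Int × String) → List String
  | _, [] => []
  | prev, e :: t => (if prev == some e.1 then [] else [pvFmt e.1 e.2.1 e.2.2]) ++ pvEmit (some e.1) t

theorem pvFoldFlatten {σ : Type} (f : σ → Int → σ) :
    ∀ (ls : List (List Int)) (acc : List Int) (d : σ),
      ls.foldl (fun d row => row.foldl f d) (acc.foldl f d)
        = (ls.foldl (fun a r => a ++ r) acc).foldl f d := by
  intro ls
  induction ls with
  | nil => intro acc d; rfl
  | cons r cs ih =>
      intro acc d
      simp only [List.foldl_cons]
      rw [← List.foldl_append (l := acc) (l' := r), ih (acc ++ r) d]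

theorem pvStep_contains (G : Int → String) (d : PySem.Dict String (List Int)) (c : Int) (k : String) :
    (pvStep G d c).contains k = d.contains k := by
  unfold pvStep
  split_ifs with h
  · rw [PySem.Dict.contains_modify]
    by_cases hk : k = G c
    · subst hk; simp [h]
    · simp [hk]
  · rfl

theorem pvStep_keys (G : Int → String) (d : PySem.Dict String (List Int)) (c : Int) :
    (pvStep G d c).keys = d.keys := by
  unfold pvStep
  split_ifs with h
  · rw [PySem.Dict.keys_modify, PySem.Dict.keys_insert_of_contains _ _ h]
  · rfl

theorem pvStepFold_keys (G : Int → String) :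
    ∀ (l : List Int) (d : PySem.Dict String (List Int)),
      (l.foldl (pvStep G) d).keys = d.keys := by
  intro l
  induction l with
  | nil => intro d; rfl
  | cons c t ih => intro d; simp only [List.foldl_cons]; rw [ih, pvStep_keys]

theorem pvStepFold_getD (G : Int → String) :
    ∀ (l : List Int) (d : PySem.Dict String (List Int)) (k : String),
      (l.foldl (pvStep G) d).getD k []
        = d.getD k [] ++ (if d.contains k then l.filter (fun c => G c == k) else []) := by
  intro l
  induction l with
  | nil => intro d k; split_ifs <;> simp
  | cons c t ih =>
      intro d k
      simp only [List.foldl_cons]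
      rw [ih, pvStep_contains]
      by_cases h : d.contains (G c) = true
      · have hstep : pvStep G d c = d.modify (G c) [] (fun l => l ++ [c]) := by
          unfold pvStep; simp [h]
        rw [hstep, PySem.Dict.getD_modify]
        by_cases hk : k = G c
        · subst hk
          simp [h, List.append_assoc]
        · have hkc : (G c == k) = false := by
            simp [beq_eq_false_iff_ne]; exact fun he => hk he.symm
          simp [hk, hkc]
      · have hstep : pvStep G d c = d := by unfold pvStep; simp [h]
        rw [hstep]
        by_cases h2 : d.contains k = true
        · have hkc : (G c == k) = false := by
            simp [beq_eq_false_iff_ne]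
            intro he; exact h (he ▸ h2)
          simp [h2, hkc]
        · simp [h2]

theorem pvInsertFold_getD :
    ∀ (l : List String) (d : PySem.Dict String (List Int)),
      (∀ k, d.getD k [] = []) →
      ∀ k, (l.foldl (fun d g => d.insert g ([] : List Int)) d).getD k [] = [] := by
  intro l
  induction l with
  | nil => intro d h k; exact h k
  | cons g t ih =>
      intro d h k
      simp only [List.foldl_cons]
      refine ih _ (fun k' => ?_) k
      rw [PySem.Dict.getD_insert]
      split_ifs
      · rfl
      · exact h k'

theorem pvALoop :
    ∀ (l : List (Int × Int × String)) (acc : List String) (cur : Option Int),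
      (l.foldl pvAStep (acc, cur)).1 = acc ++ pvEmit cur l := by
  intro l
  induction l with
  | nil => intro acc cur; simp [pvEmit]
  | cons e t ih =>
      intro acc cur
      simp only [List.foldl_cons]
      by_cases h : cur = some e.1
      · have hb : (cur == some e.1) = true := by simp [h]
        have : pvAStep (acc, cur) e = (acc, cur) := by unfold pvAStep; simp [hb]
        rw [this, ih, h]
        simp [pvEmit]
      · have hb : (cur == some e.1) = false := by simp [h]
        have : pvAStep (acc, cur) e
            = (acc ++ [pvFmt e.1 e.2.1 e.2.2], some e.1) := by
          unfold pvAStep pvFmt; simp [hb]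
        rw [this, ih]
        simp [pvEmit, hb]
  
theorem pvBZip :
    ∀ (t : List (Int × Int × String)) (e : Int × Int × String),
      ((e :: t).zip t).filterMap
          (fun pe => if pe.1.1 ≠ pe.2.1 then some (pvFmt pe.2.1 pe.2.2.1 pe.2.2.2) else none)
        = pvEmit (some e.1) t := by
  intro t
  induction t with
  | nil => intro e; rfl
  | cons f u ih =>
      intro e
      rw [List.zip_cons_cons, List.filterMap_cons, ih]
      by_cases h : e.1 = f.1
      · simp [pvEmit, h]
      · simp [pvEmit, h]

theorem pvPairsFilter (G : Int → String) (l : List Int) (g : String) :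
    List.filterMap (fun x => if G x = g then some x else none) l
      = l.filter (fun c => G c == g) := by
  induction l with
  | nil => rfl
  | cons c t ih =>
      by_cases h : G c = g <;> simp [h, ih]

theorem pvAitems (counts : List (List Int)) (gl : List String) (th : List Int) :
    (List.foldl
        (fun d row =>
          List.foldl
            (fun d count =>
              if d.contains (pvGlyphAt gl th count) = true then
                d.modify (pvGlyphAt gl th count) [] fun l => l ++ [count]
              else d)
            d row)
        (List.foldl (fun d glyph => d.insert glyph []) PySem.Dict.empty
          (PySem.List.slice gl (some 1) (some (-1))))
        counts).items
    = (PySem.List.dedup (PySem.List.slice gl (some 1) (some (-1)))).map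
        (fun k => (k, List.filterMap (fun p => if p.1 == k then some p.2 else none)
            (List.map (fun c => (pvGlyphAt gl th c, c))
              (List.foldl (fun acc row => acc ++ row) [] counts)))) := by
  set G := pvGlyphAt gl th with hG
  set inner := PySem.List.slice gl (some 1) (some (-1)) with hinner
  set d0 := List.foldl (fun d glyph => d.insert glyph ([] : List Int)) PySem.Dict.empty inner with hd0
  set flat := List.foldl (fun acc row => acc ++ row) ([] : List Int) counts with hflat
  have hlam : (fun (d : PySem.Dict String (List Int)) (count : Int) =>
      if d.contains (G count) = true then d.modify (G count) [] fun l => l ++ [count] else d)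
      = pvStep G := rfl
  rw [hlam]
  have hnest : List.foldl (fun d row => List.foldl (pvStep G) d row) d0 counts
      = List.foldl (pvStep G) d0 flat := by
    rw [hflat]; simpa using pvFoldFlatten (pvStep G) counts [] d0
  rw [hnest]
  have hkeys0 : d0.keys = PySem.List.dedup inner := by
    rw [hd0, PySem.Dict.keys_foldl_insert]
    simp [PySem.Set.update_nil_left, PySem.List.dedup_eq_ofList]
  have hkeys1 : (List.foldl (pvStep G) d0 flat).keys = PySem.List.dedup inner := by
    rw [pvStepFold_keys]; exact hkeys0
  rw [PySem.Dict.items_eq_map_keys _ (by rw [hkeys1]; exact PySem.List.nodup_dedup inner) ([] : List Int),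
    hkeys1]
  refine List.map_congr_left (fun k hk => ?_)
  rw [pvStepFold_getD]
  have hc : d0.contains k = true := (PySem.Dict.contains_iff_mem_keys d0 k).2 (hkeys0 ▸ hk)
  have h0 : d0.getD k [] = [] :=
    pvInsertFold_getD inner PySem.Dict.empty (fun k' => PySem.Dict.getD_empty k' []) k
  simp [hc, h0, pvPairsFilter]

theorem pvFinal (es : List (Int × Int × String)) :
    (List.foldl pvAStep ([], none) es).1
      = (match es with
          | [] => ([] : List String)
          | e :: _ => [pvFmt e.1 e.2.1 e.2.2]) ++
        List.filterMap (fun pe => if pe.1.1 ≠ pe.2.1 then some (pvFmt pe.2.1 pe.2.2.1 pe.2.2.2) else none)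
          (es.zip es.tail) := by
  cases es with
  | nil => rfl
  | cons e t =>
      rw [pvALoop, List.tail_cons, pvBZip]
      simp [pvEmit]

-- ===== VERDICT (by name: the statement is the Claim_ definition above) =====
theorem render_key_py_spec : Claim_equal_render_key_py := by
  intro counts gl th _dom _pre
  unfold Spec_render_key_py render_key_py render_key_py_alt
  simp only [PySem.List.slice_from_one]
  rw [pvAitems, List.filterMap_map]
  have hA : (fun (st : List String × Option Int) (e : Int × Int × String) =>
      if st.2 == some e.1 then st
      else (st.1 ++ [if e.1 ≠ e.2.1 then
              "\"" ++ e.2.2 ++ "\": " ++ PySem.Int.toStr e.1 ++ " - " ++ PySem.Int.toStr e.2.1 ++ " points"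
            else
              "\"" ++ e.2.2 ++ "\": " ++ PySem.Int.toStr e.2.1 ++ " point" ++ (if e.2.1 == 1 then "" else "s")],
            some e.1)) = pvAStep := rfl
  rw [hA]
  simp only [Function.comp]
  exact pvFinal _
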